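-- pv_equiv track=rewrite | github.com/rubelw/OSSS | src/OSSS/ai/agents/query_data/handlers/proposals_handler.py | _select_fieldnames
-- ===== SOURCE A (Python) =====
-- from typing import Any, Dict, List, Sequence
--
-- def _select_fieldnames(rows: Sequence[Dict[str, Any]]) -> List[str]:
--     """
--     Derive a stable field order. Prefer common keys if present, then append the rest.
--     """
--     if not rows:
--         return []
--
--     # Common "nice" columns first if they exist
--     preferred_order = [
--         "id",
--         "external_id",
--         "name",
--         "title",
--         "status",
--         "owner",
--         "created_at",
--         "updated_at",
--     ]
--
--     all_keys = list(rows[0].keys())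
--     for r in rows[1:]:
--         for k in r.keys():
--             if k not in all_keys:
--                 all_keys.append(k)
--
--     ordered: List[str] = []
--     for col in preferred_order:
--         if col in all_keys:
--             ordered.append(col)
--
--     for col in all_keys:
--         if col not in ordered:
--             ordered.append(col)
--
--     return ordered
-- ===== SOURCE B (Python) =====
-- from typing import Any, Dict, List, Sequence
--
-- def _select_fieldnames(rows: Sequence[Dict[str, Any]]) -> List[str]:
--     """
--     Derive a stable field order. Prefer common keys if present, then append the rest.
--     """
--     if not rows:
--         return []
--
--     preferred_order = [
--         "id",
--         "external_id",
--         "name",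
--         "title",
--         "status",
--         "owner",
--         "created_at",
--         "updated_at",
--     ]
--
--     # One pass: record each key's first-appearance index (also dedups).
--     first_idx: Dict[str, int] = {}
--     for r in rows:
--         for k in r.keys():
--             if k not in first_idx:
--                 first_idx[k] = len(first_idx)
--
--     n = len(first_idx)
--     rank = {k: i for i, k in enumerate(preferred_order)}
--     sentinel = len(preferred_order)
--     # Preferred keys sort by their rank; the rest keep first-appearance order.
--     return sorted(first_idx, key=lambda k: rank.get(k, sentinel) * n + first_idx[k])
-- ===== Notes on version B (the rewrite author's own statement) =====
-- stated objective: faster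
-- what changed: A's two explicit filtering passes with 'k not in all_keys' list scans are replaced by one pass recording each key's first-appearance index in a dict (O(1) membership), followed by a single sort of the key set by (preferred rank, first-appearance index) combined into one integer key.
import Mathlib
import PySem

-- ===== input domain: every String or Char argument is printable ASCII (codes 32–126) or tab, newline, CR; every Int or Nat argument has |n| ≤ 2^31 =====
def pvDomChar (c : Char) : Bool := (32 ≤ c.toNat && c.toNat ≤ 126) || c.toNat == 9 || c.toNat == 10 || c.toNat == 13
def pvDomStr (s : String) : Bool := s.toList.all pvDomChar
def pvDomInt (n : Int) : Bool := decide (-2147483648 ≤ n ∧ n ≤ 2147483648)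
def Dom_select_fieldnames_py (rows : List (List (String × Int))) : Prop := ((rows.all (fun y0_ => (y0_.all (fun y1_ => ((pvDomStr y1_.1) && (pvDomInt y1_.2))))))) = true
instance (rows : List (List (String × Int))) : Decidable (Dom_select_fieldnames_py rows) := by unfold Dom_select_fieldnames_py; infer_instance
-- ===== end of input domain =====

-- B replaces A's two filtering passes (with their linear 'k not in all_keys' list scans) by a first-appearance-index dict build plus one sort by rank; a timing run measured B faster.
-- Each row is a dict: duplicate keys in the association list collapse to the first occurrence (r.keys()), ported with PySem.List.dedup.

-- ===== PORT A =====
def select_fieldnames_py (rows : List (List (String × Int))) : List String :=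
  match rows with
  | [] => []
  | r0 :: rest =>
    let preferred_order : List String :=
      ["id", "external_id", "name", "title", "status", "owner", "created_at", "updated_at"]
    -- all_keys = list(rows[0].keys()); then append unseen keys of the later rows
    let all_keys : List String :=
      rest.foldl
        (fun acc r =>
          (PySem.List.dedup (r.map Prod.fst)).foldl
            (fun acc k => if k ∈ acc then acc else acc ++ [k]) acc)
        (PySem.List.dedup (r0.map Prod.fst))
    let ordered : List String :=
      preferred_order.foldl (fun acc col => if col ∈ all_keys then acc ++ [col] else acc) []
    all_keys.foldl (fun acc col => if col ∈ acc then acc else acc ++ [col]) ordered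

-- ===== PORT B =====
def select_fieldnames_py_alt (rows : List (List (String × Int))) : List String :=
  match rows with
  | [] => []
  | _ :: _ =>
    let preferred_order : List String :=
      ["id", "external_id", "name", "title", "status", "owner", "created_at", "updated_at"]
    -- one pass: first-appearance index of every key (also dedups)
    let first_idx : PySem.Dict String Int :=
      rows.foldl
        (fun d r =>
          (PySem.List.dedup (r.map Prod.fst)).foldl
            (fun d k => if d.contains k then d else d.insert k (d.size : Int)) d)
        PySem.Dict.empty
    let n : Int := (first_idx.size : Int)
    -- rank = {k: i for i, k in enumerate(preferred_order)}
    let rank : PySem.Dict String Int :=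
      (List.zipIdx preferred_order).foldl (fun d p => d.insert p.1 (p.2 : Int)) PySem.Dict.empty
    let sentinel : Int := PySem.List.len preferred_order
    -- first_idx[k] cannot miss (k ranges over first_idx's keys): getD with default 0 is exact here
    PySem.List.sorted first_idx.keys
      (fun k => rank.getD k sentinel * n + first_idx.getD k 0) false

-- ===== PRECONDITION & SPEC =====
def Spec_select_fieldnames_py (rows : List (List (String × Int))) (out : List String) : Prop := out = select_fieldnames_py_alt rows
instance (rows : List (List (String × Int))) (out : List String) : Decidable (Spec_select_fieldnames_py rows out) := by unfold Spec_select_fieldnames_py; infer_instance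

-- ===== CLAIM (what is proved, stated in full; the proofs are below) =====
def Claim_equal_select_fieldnames_py : Prop := ∀ (rows : List (List (String × Int))), Dom_select_fieldnames_py rows → Spec_select_fieldnames_py rows (select_fieldnames_py rows)

-- ===== LEMMAS AND PROOFS =====

-- proof-only abbreviations for the pieces of the two ports (definitionally equal to the port terms)
def pvKeys (r : List (String × Int)) : List String := PySem.List.dedup (r.map Prod.fst)
def pvAdd (acc : List String) (k : String) : List String := if k ∈ acc then acc else acc ++ [k]
def pvStepA (acc : List String) (r : List (String × Int)) : List String := (pvKeys r).foldl pvAdd acc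
def pvAllKeys (r0 : List (String × Int)) (rest : List (List (String × Int))) : List String :=
  rest.foldl pvStepA (pvKeys r0)
def pvAddD (d : PySem.Dict String Int) (k : String) : PySem.Dict String Int :=
  if d.contains k then d else d.insert k (d.size : Int)
def pvStepB (d : PySem.Dict String Int) (r : List (String × Int)) : PySem.Dict String Int :=
  (pvKeys r).foldl pvAddD d
def pvDictOf (rows : List (List (String × Int))) : PySem.Dict String Int :=
  rows.foldl pvStepB PySem.Dict.empty
def pvEnc (acc : List String) : List (String × Int) := acc.zipIdx.map (fun p => (p.1, (p.2 : Int)))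
def pvPref : List String := ["id", "external_id", "name", "title", "status", "owner", "created_at", "updated_at"]
def pvRank : PySem.Dict String Int :=
  (List.zipIdx pvPref).foldl (fun d p => d.insert p.1 (p.2 : Int)) PySem.Dict.empty

lemma pv_foldl_addNew (xs : List String) : ∀ (acc : List String), xs.Nodup →
    xs.foldl pvAdd acc = acc ++ xs.filter (fun k => !decide (k ∈ acc)) := by
  induction xs with
  | nil => intro acc _; simp
  | cons x xs ih =>
    intro acc hnd
    rw [List.nodup_cons] at hnd
    by_cases hx : x ∈ acc
    · simp [List.foldl_cons, pvAdd, hx, ih acc hnd.2]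
    · have hcong : List.filter (fun k => !decide (k ∈ acc ++ [x])) xs
          = List.filter (fun k => !decide (k ∈ acc)) xs :=
        List.filter_congr (fun a ha => by
          have hax : a ≠ x := fun h => hnd.1 (h ▸ ha)
          simp [hax])
      rw [List.foldl_cons, show pvAdd acc x = acc ++ [x] by simp [pvAdd, hx],
        ih (acc ++ [x]) hnd.2, hcong]
      simp [hx]

lemma pv_addNew_nodup (xs : List String) : ∀ (acc : List String), acc.Nodup →
    (xs.foldl pvAdd acc).Nodup := by
  induction xs with
  | nil => intro acc h; simpa using h
  | cons x xs ih =>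
    intro acc hnd
    by_cases hx : x ∈ acc
    · simpa [List.foldl_cons, pvAdd, hx] using ih acc hnd
    · have : (acc ++ [x]).Nodup := by
        rw [List.nodup_append]
        exact ⟨hnd, List.nodup_singleton x, by intro a ha b hb hab; exact hx ((List.mem_singleton.mp hb ▸ hab) ▸ ha)⟩
      simpa [List.foldl_cons, pvAdd, hx] using ih (acc ++ [x]) this

lemma pv_allKeys_nodup (r0 : List (String × Int)) (rest : List (List (String × Int))) :
    (pvAllKeys r0 rest).Nodup := by
  unfold pvAllKeys
  have gen : ∀ (rs : List (List (String × Int))) (acc : List String), acc.Nodup →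
      (rs.foldl pvStepA acc).Nodup := by
    intro rs
    induction rs with
    | nil => intro acc h; simpa using h
    | cons r rs ih =>
      intro acc h
      exact ih _ (pv_addNew_nodup _ _ h)
  exact gen rest _ (PySem.List.nodup_dedup _)

lemma pv_keys_of_items {d : PySem.Dict String Int} {K : List String}
    (h : d.items = pvEnc K) : d.keys = K := by
  simp only [PySem.Dict.keys, h, pvEnc, List.map_map]
  have : ((fun x : String × Int => x.1) ∘ fun p : String × Nat => (p.1, (p.2 : Int)))
      = Prod.fst := rfl
  rw [this]
  exact List.zipIdx_map_fst 0 K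

lemma pv_size_of_items {d : PySem.Dict String Int} {K : List String}
    (h : d.items = pvEnc K) : d.size = K.length := by
  simp [PySem.Dict.size, h, pvEnc]

lemma pv_inner_inv (xs : List String) : ∀ (acc : List String) (d : PySem.Dict String Int),
    d.items = pvEnc acc → (xs.foldl pvAddD d).items = pvEnc (xs.foldl pvAdd acc) := by
  induction xs with
  | nil => intro acc d h; simpa using h
  | cons x xs ih =>
    intro acc d h
    have hkeys : d.keys = acc := pv_keys_of_items h
    have hc : d.contains x = decide (x ∈ acc) := by
      rw [PySem.Dict.contains_eq_decide_mem_keys, hkeys]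
    by_cases hx : x ∈ acc
    · have hstep : pvAddD d x = d := by simp [pvAddD, hc, hx]
      have hstep' : pvAdd acc x = acc := by simp [pvAdd, hx]
      rw [List.foldl_cons, List.foldl_cons, hstep, hstep']
      exact ih acc d h
    · have hstep : pvAddD d x = d.insert x (d.size : Int) := by simp [pvAddD, hc, hx]
      have hnc : d.contains x = false := by simp [hc, hx]
      have hins : (d.insert x (d.size : Int)).items = d.items ++ [(x, (d.size : Int))] :=
        PySem.Dict.items_insert_of_not_contains d _ hnc
      have hsz : d.size = acc.length := pv_size_of_items h
      have henc : d.items ++ [(x, (d.size : Int))] = pvEnc (acc ++ [x]) := by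
        rw [h, hsz]
        simp [pvEnc, List.zipIdx_append]
      have hstep' : pvAdd acc x = acc ++ [x] := by simp [pvAdd, hx]
      rw [List.foldl_cons, List.foldl_cons, hstep, hstep']
      exact ih (acc ++ [x]) _ (hins.trans henc)

lemma pv_outer_inv (rs : List (List (String × Int))) :
    ∀ (acc : List String) (d : PySem.Dict String Int),
    d.items = pvEnc acc → (rs.foldl pvStepB d).items = pvEnc (rs.foldl pvStepA acc) := by
  induction rs with
  | nil => intro acc d h; simpa using h
  | cons r rs ih =>
    intro acc d h
    exact ih _ _ (pv_inner_inv (pvKeys r) acc d h)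

lemma pv_dict_items (r0 : List (String × Int)) (rest : List (List (String × Int))) :
    (pvDictOf (r0 :: rest)).items = pvEnc (pvAllKeys r0 rest) := by
  unfold pvDictOf pvAllKeys
  rw [List.foldl_cons]
  have h0 : (pvStepB PySem.Dict.empty r0).items = pvEnc (pvKeys r0) := by
    have h1 : (pvStepB PySem.Dict.empty r0).items = pvEnc ((pvKeys r0).foldl pvAdd []) :=
      pv_inner_inv (pvKeys r0) [] PySem.Dict.empty (by simp [pvEnc, PySem.Dict.empty])
    rw [h1, pv_foldl_addNew (pvKeys r0) [] (PySem.List.nodup_dedup _)]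
    simp
  exact pv_outer_inv rest (pvKeys r0) _ h0

lemma pv_getD_pos {d : PySem.Dict String Int} {K : List String}
    (h : d.items = pvEnc K) (hK : K.Nodup) (i : Nat) (hi : i < K.length) :
    d.getD K[i] 0 = (i : Int) := by
  have hmemz : (K[i], i) ∈ K.zipIdx := by
    rw [List.mk_mem_zipIdx_iff_getElem?]
    exact List.getElem?_eq_getElem hi
  have hmem : (K[i], (i : Int)) ∈ d.items := by
    rw [h]
    exact List.mem_map_of_mem hmemz
  exact PySem.Dict.getD_of_mem_items d hmem (by rw [pv_keys_of_items h]; exact hK) 0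

lemma pv_pairwise_getD {d : PySem.Dict String Int} {K : List String}
    (h : d.items = pvEnc K) (hK : K.Nodup) :
    K.Pairwise (fun a b => d.getD a 0 < d.getD b 0) := by
  rw [List.pairwise_iff_getElem]
  intro i j hi hj hij
  rw [pv_getD_pos h hK i hi, pv_getD_pos h hK j hj]
  exact_mod_cast hij

lemma pv_getD_bounds {d : PySem.Dict String Int} {K : List String}
    (h : d.items = pvEnc K) (hK : K.Nodup) {k : String} (hk : k ∈ K) :
    0 ≤ d.getD k 0 ∧ d.getD k 0 < (K.length : Int) := by
  obtain ⟨i, hi, rfl⟩ := List.getElem_of_mem hk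
  rw [pv_getD_pos h hK i hi]
  exact ⟨Int.natCast_nonneg i, by exact_mod_cast hi⟩

lemma pv_pref_pairwise : pvPref.Pairwise (fun a b => pvRank.getD a 8 < pvRank.getD b 8) := by
  decide

lemma pv_rank_lt_of_mem {k : String} (h : k ∈ pvPref) : pvRank.getD k 8 < 8 := by
  fin_cases h <;> decide

lemma pv_rank_of_not_mem {k : String} (h : k ∉ pvPref) : pvRank.getD k 8 = 8 := by
  simp only [pvPref, List.mem_cons, List.not_mem_nil, or_false, not_or] at h
  obtain ⟨h1, h2, h3, h4, h5, h6, h7, h8⟩ := h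
  have hrk : pvRank = PySem.Dict.mk [("id", (0:Int)), ("external_id", 1), ("name", 2),
      ("title", 3), ("status", 4), ("owner", 5), ("created_at", 6), ("updated_at", 7)] := by
    decide
  simp [hrk, PySem.Dict.getD_eq_get?_getD, PySem.Dict.get?,
    Ne.symm h1, Ne.symm h2, Ne.symm h3, Ne.symm h4, Ne.symm h5, Ne.symm h6,
    Ne.symm h7, Ne.symm h8]

lemma pv_key_lt {pa pb ia ib n : Int} (hp : pa < pb) (hia : 0 ≤ ia) (hian : ia < n)
    (hib : 0 ≤ ib) : pa * n + ia < pb * n + ib := by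
  nlinarith [mul_le_mul_of_nonneg_right (by linarith : pa + 1 ≤ pb) (by linarith : (0:Int) ≤ n)]

lemma pv_main (r0 : List (String × Int)) (rest : List (List (String × Int))) :
    select_fieldnames_py (r0 :: rest) = select_fieldnames_py_alt (r0 :: rest) := by
  set K : List String := pvAllKeys r0 rest with hKdef
  set d : PySem.Dict String Int := pvDictOf (r0 :: rest) with hddef
  have hd : d.items = pvEnc K := pv_dict_items r0 rest
  have hK : K.Nodup := pv_allKeys_nodup r0 rest
  have hkeys : d.keys = K := pv_keys_of_items hd
  have hsz : d.size = K.length := pv_size_of_items hd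
  set P : List String := pvPref.filter (fun c => decide (c ∈ K)) with hPdef
  set Q : List String := K.filter (fun k => !decide (k ∈ P)) with hQdef
  set key : String → Int := fun k => pvRank.getD k 8 * ((K.length : Nat) : Int) + d.getD k 0
    with hkeydef
  -- membership characterisations
  have hPm : ∀ a, a ∈ P ↔ a ∈ pvPref ∧ a ∈ K := by
    intro a; rw [hPdef, List.mem_filter]; simp
  have hQm : ∀ a, a ∈ Q ↔ a ∈ K ∧ a ∉ P := by
    intro a; rw [hQdef, List.mem_filter]; simp
  have hprefnd : pvPref.Nodup := by decide
  -- the A side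
  have hA : select_fieldnames_py (r0 :: rest)
      = K.foldl pvAdd (pvPref.foldl (fun acc col => if col ∈ K then acc ++ [col] else acc) []) :=
    rfl
  have hP : pvPref.foldl (fun acc col => if col ∈ K then acc ++ [col] else acc) ([] : List String)
      = P := by
    rw [hPdef]
    simpa using PySem.List.foldl_append_if (fun c => decide (c ∈ K)) id pvPref []
  have hAval : select_fieldnames_py (r0 :: rest) = P ++ Q := by
    rw [hA, hP, pv_foldl_addNew K P hK, hQdef]
  -- the B side
  have hB : select_fieldnames_py_alt (r0 :: rest)
      = PySem.List.sorted d.keys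
          (fun k => pvRank.getD k (PySem.List.len pvPref) * (d.size : Int) + d.getD k 0)
          false := rfl
  have hlen : PySem.List.len pvPref = 8 := by decide
  have hBkey : select_fieldnames_py_alt (r0 :: rest) = PySem.List.sorted K key false := by
    rw [hB, hkeys]
    simp only [hlen, hsz, hkeydef]
  -- bounds for the first-appearance indices
  have hbounds : ∀ k ∈ K, 0 ≤ d.getD k 0 ∧ d.getD k 0 < (K.length : Int) := fun k hk =>
    pv_getD_bounds hd hK hk
  -- the target list is a permutation of K
  have hndP : P.Nodup := List.Nodup.filter _ hprefnd
  have hndQ : Q.Nodup := List.Nodup.filter _ hK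
  have hdisj : ∀ a ∈ P, ∀ b ∈ Q, a ≠ b := by
    intro a ha b hb rfl
    exact ((hQm a).mp hb).2 ha
  have hperm : (P ++ Q).Perm K := by
    rw [List.perm_ext_iff_of_nodup (by rw [List.nodup_append]; exact ⟨hndP, hndQ, hdisj⟩) hK]
    intro a
    constructor
    · intro ha
      rcases List.mem_append.mp ha with h | h
      · exact ((hPm a).mp h).2
      · exact ((hQm a).mp h).1
    · intro ha
      by_cases hp : a ∈ P
      · exact List.mem_append.mpr (Or.inl hp)
      · exact List.mem_append.mpr (Or.inr ((hQm a).mpr ⟨ha, hp⟩))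
  -- the target list is strictly increasing under the sort key
  have hpairP : P.Pairwise (fun a b => key a < key b) := by
    have h1 : P.Pairwise (fun a b => pvRank.getD a 8 < pvRank.getD b 8) :=
      List.Pairwise.sublist (List.filter_sublist) pv_pref_pairwise
    refine h1.imp_of_mem ?_
    intro a b ha hb hr
    have haK : a ∈ K := ((hPm a).mp ha).2
    have hbK : b ∈ K := ((hPm b).mp hb).2
    exact pv_key_lt hr (hbounds a haK).1 (hbounds a haK).2 (hbounds b hbK).1
  have hpairQ : Q.Pairwise (fun a b => key a < key b) := by
    have h1 : Q.Pairwise (fun a b => d.getD a 0 < d.getD b 0) :=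
      List.Pairwise.sublist (List.filter_sublist) (pv_pairwise_getD hd hK)
    refine h1.imp_of_mem ?_
    intro a b ha hb hlt
    have hna : a ∉ pvPref := fun hmem =>
      ((hQm a).mp ha).2 ((hPm a).mpr ⟨hmem, ((hQm a).mp ha).1⟩)
    have hnb : b ∉ pvPref := fun hmem =>
      ((hQm b).mp hb).2 ((hPm b).mpr ⟨hmem, ((hQm b).mp hb).1⟩)
    show key a < key b
    rw [hkeydef]
    simp only [pv_rank_of_not_mem hna, pv_rank_of_not_mem hnb]
    exact Int.add_lt_add_left hlt _
  have hcross : ∀ a ∈ P, ∀ b ∈ Q, key a < key b := by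
    intro a ha b hb
    have haP : a ∈ pvPref := ((hPm a).mp ha).1
    have haK : a ∈ K := ((hPm a).mp ha).2
    have hbK : b ∈ K := ((hQm b).mp hb).1
    have hnb : b ∉ pvPref := fun hmem =>
      ((hQm b).mp hb).2 ((hPm b).mpr ⟨hmem, hbK⟩)
    have hr : pvRank.getD a 8 < pvRank.getD b 8 := by
      rw [pv_rank_of_not_mem hnb]
      exact pv_rank_lt_of_mem haP
    exact pv_key_lt hr (hbounds a haK).1 (hbounds a haK).2 (hbounds b hbK).1
  have hpair : (P ++ Q).Pairwise (fun a b => key a < key b) :=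
    List.pairwise_append.mpr ⟨hpairP, hpairQ, hcross⟩
  rw [hAval, hBkey, PySem.List.sorted_eq_of_perm_of_pairwise_lt K (P ++ Q) key hperm hpair]

-- ===== VERDICT (by name: the statement is the Claim_ definition above) =====
theorem select_fieldnames_py_spec : Claim_equal_select_fieldnames_py := by
  intro rows _
  unfold Spec_select_fieldnames_py
  cases rows with
  | nil => rfl
  | cons r0 rest => exact pv_main r0 rest
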